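-- pv_equiv track=rewrite | github.com/realtek1990/rebook | ReBook.app/Contents/Resources/app/corrector.py | split_into_blocks
-- ===== SOURCE A (Python) =====
-- def split_into_blocks(markdown: str) -> list[dict]:
--     """Split markdown into typed blocks. Images get their own 'image' type
--     so they are NEVER sent to the AI and always preserved in-place."""
--     lines = markdown.split('\n')
--     blocks = []
--     current_text = []
--
--     for line in lines:
--         stripped = line.strip()
--         # Images — MUST be preserved verbatim (never sent to AI)
--         if stripped.startswith('!['):
--             if current_text:
--                 blocks.append({"type": "text", "content": '\n'.join(current_text)})
--                 current_text = []
--             blocks.append({"type": "image", "content": line})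
--         elif (stripped.startswith('#') or
--               stripped == '---' or
--               stripped == '***' or
--               stripped == ''):
--             if current_text:
--                 blocks.append({"type": "text", "content": '\n'.join(current_text)})
--                 current_text = []
--             blocks.append({"type": "structural", "content": line})
--         else:
--             current_text.append(line)
--
--     if current_text:
--         blocks.append({"type": "text", "content": '\n'.join(current_text)})
--
--     return blocks
-- ===== SOURCE B (Python) =====
-- def _classify(line):
--     s = line.strip()
--     if s.startswith('!['):
--         return 'image'
--     if s.startswith('#') or s in ('---', '***', ''):
--         return 'structural'
--     return 'text'
--
--
-- def split_into_blocks(markdown: str) -> list[dict]: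
--     """Classify every line first, then coalesce runs of consecutive 'text'
--     lines into one block; 'image'/'structural' lines each become one block."""
--     lines = markdown.split('\n')
--     blocks = []
--     i = 0
--     n = len(lines)
--     while i < n:
--         t = _classify(lines[i])
--         if t == 'text':
--             j = i + 1
--             while j < n and _classify(lines[j]) == 'text':
--                 j += 1
--             blocks.append({"type": "text", "content": '\n'.join(lines[i:j])})
--             i = j
--         else:
--             blocks.append({"type": t, "content": lines[i]})
--             i += 1
--     return blocks
-- ===== Notes on version B (the rewrite author's own statement) =====
-- stated objective: alternative
-- what changed: Replaces A's accumulate-and-flush single pass (a mutable line buffer flushed before each non-text block and at the end) by a classify-then-coalesce decomposition: a helper classifies every line, runs of consecutive plain-text lines are coalesced into one joined block by an index scan, and image/structural lines each emit their own block.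
import Mathlib
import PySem

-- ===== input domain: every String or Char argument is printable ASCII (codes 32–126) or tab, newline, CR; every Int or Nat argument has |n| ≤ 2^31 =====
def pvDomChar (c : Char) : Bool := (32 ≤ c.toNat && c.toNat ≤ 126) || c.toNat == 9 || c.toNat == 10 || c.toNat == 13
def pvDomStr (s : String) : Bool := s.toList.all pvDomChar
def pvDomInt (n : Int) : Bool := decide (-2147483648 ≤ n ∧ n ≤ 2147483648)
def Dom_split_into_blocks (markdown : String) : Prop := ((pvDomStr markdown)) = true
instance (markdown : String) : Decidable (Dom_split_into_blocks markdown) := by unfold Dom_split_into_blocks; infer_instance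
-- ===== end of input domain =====

-- B replaces A's accumulate-and-flush pass by classify-each-line-then-coalesce-text-runs; objective: alternative decomposition (same cost).

-- ===== PORT A =====
-- A's loop: state (blocks, current_text); flush current_text before each non-text block and at the end.
-- (split? "\n" is always `some` since the separator is the nonempty literal "\n"; getD's default is unreachable)
def pvLoopA (blocks : List (List (String × String))) (cur : List String) :
    List String → List (List (String × String))
  | [] => if cur == [] then blocks else blocks ++ [[("type", "text"), ("content", PySem.Str.join "\n" cur)]]
  | l :: ls =>
    let stripped := PySem.Str.strip l
    if PySem.Str.startswith stripped "![" then
      pvLoopA ((if cur == [] then blocks else blocks ++ [[("type", "text"), ("content", PySem.Str.join "\n" cur)]])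
        ++ [[("type", "image"), ("content", l)]]) [] ls
    else if PySem.Str.startswith stripped "#" || stripped == "---" || stripped == "***" || stripped == "" then
      pvLoopA ((if cur == [] then blocks else blocks ++ [[("type", "text"), ("content", PySem.Str.join "\n" cur)]])
        ++ [[("type", "structural"), ("content", l)]]) [] ls
    else
      pvLoopA blocks (cur ++ [l]) ls

def split_into_blocks (markdown : String) : List (List (String × String)) :=
  pvLoopA [] [] ((PySem.Str.split? markdown "\n").getD [])

-- ===== PORT B =====
def pvClassify (line : String) : String :=
  let s := PySem.Str.strip line
  if PySem.Str.startswith s "![" then "image"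
  else if PySem.Str.startswith s "#" || s == "---" || s == "***" || s == "" then "structural"
  else "text"

-- B's run-coalescing walk: the Python index scan j over 'text' lines is the takeWhile/dropWhile split.
def pvGoB : List String → List (List (String × String))
  | [] => []
  | l :: ls =>
    let t := pvClassify l
    if t == "text" then
      [("type", "text"), ("content", PySem.Str.join "\n" (l :: ls.takeWhile (fun x => pvClassify x == "text")))]
        :: pvGoB (ls.dropWhile (fun x => pvClassify x == "text"))
    else
      [("type", t), ("content", l)] :: pvGoB ls
termination_by ls => ls.length
decreasing_by
  · simp only [List.length_cons]; exact Nat.lt_succ_of_le (List.length_dropWhile_le _ _)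
  · simp only [List.length_cons]; exact Nat.lt_succ_of_le (Nat.le_refl _)

def split_into_blocks_alt (markdown : String) : List (List (String × String)) :=
  pvGoB ((PySem.Str.split? markdown "\n").getD [])

-- ===== PRECONDITION & SPEC =====
def Spec_split_into_blocks (markdown : String) (out : List (List (String × String))) : Prop := out = split_into_blocks_alt markdown
instance (markdown : String) (out : List (List (String × String))) : Decidable (Spec_split_into_blocks markdown out) := by unfold Spec_split_into_blocks; infer_instance

-- ===== CLAIM (what is proved, stated in full; the proofs are below) =====
def Claim_equal_split_into_blocks : Prop := ∀ (markdown : String), Dom_split_into_blocks markdown → Spec_split_into_blocks markdown (split_into_blocks markdown)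

-- ===== LEMMAS AND PROOFS =====

def pvFlush (cur : List String) : List (List (String × String)) :=
  if cur == [] then [] else [[("type", "text"), ("content", PySem.Str.join "\n" cur)]]

def pvIsText (x : String) : Bool := pvClassify x == "text"

def pvBlockOf (r : String) : List (String × String) :=
  [("type", pvClassify r), ("content", r)]

theorem pvClassify_def (l : String) : pvClassify l =
    (if PySem.Str.startswith (PySem.Str.strip l) "![" then "image"
     else if PySem.Str.startswith (PySem.Str.strip l) "#" || PySem.Str.strip l == "---" ||
            PySem.Str.strip l == "***" || PySem.Str.strip l == "" then "structural"
     else "text") := rfl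

theorem pvLoopA_nil (blocks : List (List (String × String))) (cur : List String) :
    pvLoopA blocks cur [] = (if cur == [] then blocks else blocks ++ [[("type", "text"), ("content", PySem.Str.join "\n" cur)]]) := rfl

theorem pvLoopA_cons (blocks : List (List (String × String))) (cur : List String) (l : String) (ls : List String) :
    pvLoopA blocks cur (l :: ls) =
      (if PySem.Str.startswith (PySem.Str.strip l) "![" then
        pvLoopA ((if cur == [] then blocks else blocks ++ [[("type", "text"), ("content", PySem.Str.join "\n" cur)]])
          ++ [[("type", "image"), ("content", l)]]) [] ls
      else if PySem.Str.startswith (PySem.Str.strip l) "#" || PySem.Str.strip l == "---" ||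
             PySem.Str.strip l == "***" || PySem.Str.strip l == "" then
        pvLoopA ((if cur == [] then blocks else blocks ++ [[("type", "text"), ("content", PySem.Str.join "\n" cur)]])
          ++ [[("type", "structural"), ("content", l)]]) [] ls
      else
        pvLoopA blocks (cur ++ [l]) ls) := rfl

-- accumulator lemma
theorem pvLoopA_acc (ls : List String) : ∀ (blocks : List (List (String × String))) (cur : List String),
    pvLoopA blocks cur ls = blocks ++ pvLoopA [] cur ls := by
  induction ls with
  | nil =>
    intro blocks cur
    rw [pvLoopA_nil, pvLoopA_nil]
    by_cases h : cur == [] <;> simp [h]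
  | cons l ls ih =>
    intro blocks cur
    rw [pvLoopA_cons, pvLoopA_cons]
    split_ifs with h1 h2
    all_goals try exact ih _ _
    all_goals (conv_rhs => rw [ih])
    all_goals rw [ih]
    all_goals simp

theorem pvClassify_cases (l : String) :
    (pvClassify l = "text" ∧
      PySem.Str.startswith (PySem.Str.strip l) "![" = false ∧
      (PySem.Str.startswith (PySem.Str.strip l) "#" || PySem.Str.strip l == "---" ||
        PySem.Str.strip l == "***" || PySem.Str.strip l == "") = false) ∨
    (pvClassify l = "image" ∧ PySem.Str.startswith (PySem.Str.strip l) "![" = true) ∨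
    (pvClassify l = "structural" ∧
      PySem.Str.startswith (PySem.Str.strip l) "![" = false ∧
      (PySem.Str.startswith (PySem.Str.strip l) "#" || PySem.Str.strip l == "---" ||
        PySem.Str.strip l == "***" || PySem.Str.strip l == "") = true) := by
  rw [pvClassify_def]
  split_ifs with h1 h2
  · right; left; exact ⟨rfl, h1⟩
  · right; right; exact ⟨rfl, Bool.eq_false_iff.mpr h1, h2⟩
  · left; exact ⟨rfl, Bool.eq_false_iff.mpr h1, Bool.eq_false_iff.mpr h2⟩

-- span lemma: the A-loop on (cur, ls) is the flush of cur++text-run, then one block per step on the rest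
theorem pvLoopA_span (ls : List String) : ∀ (cur : List String),
    pvLoopA [] cur ls =
      pvFlush (cur ++ ls.takeWhile pvIsText) ++
        (match ls.dropWhile pvIsText with
         | [] => []
         | r :: rs => pvBlockOf r :: pvLoopA [] [] rs) := by
  induction ls with
  | nil => intro cur; simp [pvLoopA_nil, pvFlush]
  | cons l ls ih =>
    intro cur
    rcases pvClassify_cases l with ⟨ht, h1, h2⟩ | ⟨ht, h1⟩ | ⟨ht, h1, h2⟩
    · -- text line: keep accumulating
      have htx : pvIsText l = true := by simp [pvIsText, ht]
      rw [pvLoopA_cons, if_neg (by rw [h1]; exact Bool.false_ne_true), if_neg (by rw [h2]; exact Bool.false_ne_true), ih (cur ++ [l])]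
      simp [htx]
    · -- image line: flush, emit
      have htx : pvIsText l = false := by simp [pvIsText, ht]
      rw [pvLoopA_cons, if_pos h1, pvLoopA_acc]
      simp only [List.takeWhile_cons, List.dropWhile_cons, htx, Bool.false_eq_true, if_false]
      unfold pvBlockOf pvFlush
      rw [ht]
      by_cases hc : cur == [] <;> simp [hc]
    · -- structural line: flush, emit
      have htx : pvIsText l = false := by simp [pvIsText, ht]
      rw [pvLoopA_cons, if_neg (by rw [h1]; exact Bool.false_ne_true), if_pos h2, pvLoopA_acc]
      simp only [List.takeWhile_cons, List.dropWhile_cons, htx, Bool.false_eq_true, if_false]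
      unfold pvBlockOf pvFlush
      rw [ht]
      by_cases hc : cur == [] <;> simp [hc]

theorem pvDropWhile_head_false {α : Type} (p : α → Bool) :
    ∀ (l : List α) (r : α) (rs : List α), l.dropWhile p = r :: rs → p r = false := by
  intro l
  induction l with
  | nil => intro r rs h; simp at h
  | cons a l ih =>
    intro r rs h
    rw [List.dropWhile_cons] at h
    by_cases hp : p a = true
    · rw [if_pos hp] at h; exact ih r rs h
    · rw [if_neg hp] at h
      cases h
      simpa using hp

theorem pvPred_eq : (fun x : String => pvClassify x == "text") = pvIsText := rfl

theorem pvLoopA_eq_goB_aux : ∀ (n : Nat) (ls : List String), ls.length ≤ n → pvLoopA [] [] ls = pvGoB ls := by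
  intro n
  induction n with
  | zero =>
    intro ls h
    have : ls = [] := List.eq_nil_of_length_eq_zero (Nat.le_zero.mp h)
    subst this
    simp [pvLoopA_nil, pvGoB]
  | succ n ih =>
    intro ls h
    cases ls with
    | nil => simp [pvLoopA_nil, pvGoB]
    | cons l ls' =>
      rcases pvClassify_cases l with ⟨ht, h1, h2⟩ | ⟨ht, h1⟩ | ⟨ht, h1, h2⟩
      · -- text line: one coalesced block, then the rest
        have htx : pvIsText l = true := by simp [pvIsText, ht]
        rw [pvLoopA_span]
        rw [pvGoB]
        simp only [ht, beq_self_eq_true, if_true, pvPred_eq]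
        simp only [List.takeWhile_cons, List.dropWhile_cons, htx, if_true, List.nil_append]
        rw [show pvFlush (l :: List.takeWhile pvIsText ls') =
              [[("type", "text"), ("content", PySem.Str.join "\n" (l :: List.takeWhile pvIsText ls'))]] from by
            simp [pvFlush]]
        rw [List.singleton_append]
        have hlen : (List.dropWhile pvIsText ls').length ≤ n :=
          le_trans (List.length_dropWhile_le _ _) (Nat.le_of_succ_le_succ h)
        have htail : (match List.dropWhile pvIsText ls' with
            | [] => ([] : List (List (String × String)))
            | r :: rs => pvBlockOf r :: pvLoopA [] [] rs) = pvGoB (List.dropWhile pvIsText ls') := by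
          rcases hdr : List.dropWhile pvIsText ls' with _ | ⟨r, rs⟩
          · rw [pvGoB]
          · have hr := pvDropWhile_head_false pvIsText ls' r rs hdr
            have hrn : (r :: rs).length ≤ n := hdr ▸ hlen
            have hstep : pvLoopA [] [] (r :: rs) = pvBlockOf r :: pvLoopA [] [] rs := by
              rw [pvLoopA_span]
              simp [hr, pvFlush]
            exact hstep.symm.trans (ih _ hrn)
        rw [htail]
      · -- image line
        have htx : pvIsText l = false := by simp [pvIsText, ht]
        rw [pvLoopA_span]
        rw [pvGoB]
        simp only [pvPred_eq]
        rw [if_neg (by rw [ht]; decide)]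
        simp only [List.takeWhile_cons, List.dropWhile_cons, htx, Bool.false_eq_true, if_false, List.nil_append]
        rw [show pvFlush [] = ([] : List (List (String × String))) from rfl, List.nil_append,
            show pvBlockOf l = [("type", pvClassify l), ("content", l)] from rfl,
            ih ls' (Nat.le_of_succ_le_succ h)]
      · -- structural line
        have htx : pvIsText l = false := by simp [pvIsText, ht]
        rw [pvLoopA_span]
        rw [pvGoB]
        simp only [pvPred_eq]
        rw [if_neg (by rw [ht]; decide)]
        simp only [List.takeWhile_cons, List.dropWhile_cons, htx, Bool.false_eq_true, if_false, List.nil_append]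
        rw [show pvFlush [] = ([] : List (List (String × String))) from rfl, List.nil_append,
            show pvBlockOf l = [("type", pvClassify l), ("content", l)] from rfl,
            ih ls' (Nat.le_of_succ_le_succ h)]

theorem pvLoopA_eq_goB (ls : List String) : pvLoopA [] [] ls = pvGoB ls :=
  pvLoopA_eq_goB_aux ls.length ls (Nat.le_refl _)

-- ===== VERDICT (by name: the statement is the Claim_ definition above) =====
theorem split_into_blocks_spec : Claim_equal_split_into_blocks := by
  intro md _
  unfold Spec_split_into_blocks split_into_blocks split_into_blocks_alt
  exact pvLoopA_eq_goB _
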